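-- pv_equiv track=rewrite | github.com/ChaeyeonHan/Algorithm | 프로그래머스/2/389479. 서버 증설 횟수/서버 증설 횟수.py | solution
-- ===== SOURCE A (Python) =====
-- def solution(players, m, k):
--     answer = 0
--     # m명 늘어날때마다 서버 1대 추가. 서버는 k시간 운영 후 반납
--     server = [0 for _ in range(len(players))]
--     for i in range(len(players)):
--         if players[i] >= m:
--             n = players[i] // m  # 필요한 서버 수
--
--             if server[i] < n:  # 서버가 부족한 경우
--                 require = n-server[i]  # 필요한 서버 수
--                 answer += require
--
--                 for j in range(k):  # k시간 동안만 유효. 그 시간 범위에만 더해서 추가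
--                     if i+j < len(server):
--                         server[i+j] += require
--                     else:
--                         break
--
--
--     return answer
-- ===== SOURCE B (Python) =====
-- def solution(players, m, k):
--     n = len(players)
--     diff = [0] * n   # diff[t] = total capacity expiring right before slot t
--     active = 0
--     answer = 0
--     for i in range(n):
--         active += diff[i]
--         if players[i] >= m:
--             need = players[i] // m
--             if active < need:
--                 req = need - active
--                 answer += req
--                 if k > 0:
--                     active += req
--                     if i + k < n:
--                         diff[i + k] -= req
--     return answer
-- ===== Notes on version B (the rewrite author's own statement) =====
-- stated objective: faster
-- what changed: Replaced the per-addition inner loop that writes the added capacity into the next k slots of a server array by a single pass with a difference array: a running 'active' count plus one expiry entry per addition, removing the O(k) inner loop.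
import Mathlib
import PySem

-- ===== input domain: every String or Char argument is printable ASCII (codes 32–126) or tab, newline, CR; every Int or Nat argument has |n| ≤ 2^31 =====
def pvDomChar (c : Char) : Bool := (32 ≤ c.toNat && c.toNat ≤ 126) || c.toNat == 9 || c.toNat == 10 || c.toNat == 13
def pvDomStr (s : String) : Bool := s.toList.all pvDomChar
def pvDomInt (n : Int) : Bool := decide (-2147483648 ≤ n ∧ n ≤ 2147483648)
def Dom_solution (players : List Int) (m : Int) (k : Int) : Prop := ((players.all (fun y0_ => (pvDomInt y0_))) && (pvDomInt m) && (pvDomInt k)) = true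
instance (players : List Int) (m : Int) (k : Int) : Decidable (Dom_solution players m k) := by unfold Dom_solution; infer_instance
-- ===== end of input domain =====

-- B replaces A's O(k) inner range-update by a one-pass difference array (asymptotically faster).

-- ===== PORT A =====
-- inner loop 'for j in range(k): if i+j < len(server): server[i+j] += require else break'
-- (pos = i + j; range(k) performs k.toNat iterations; the break is the early return)
def aInner (server : List Int) (pos : Nat) (r : Int) : Nat → List Int
  | 0 => server
  | c+1 =>
    if pos < server.length then
      aInner (server.set pos (server.getD pos 0 + r)) (pos+1) r c
    else server

-- outer loop 'for i in range(len(players))', c = remaining iterations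
def aOuter (players : List Int) (m k : Int) (i : Nat) (server : List Int) (answer : Int) : Nat → Int
  | 0 => answer
  | c+1 =>
    if players.getD i 0 ≥ m then
      let n := PySem.Int.floordiv (players.getD i 0) m
      if server.getD i 0 < n then
        let req := n - server.getD i 0
        aOuter players m k (i+1) (aInner server i req k.toNat) (answer + req) c
      else aOuter players m k (i+1) server answer c
    else aOuter players m k (i+1) server answer c

def solution (players : List Int) (m : Int) (k : Int) : Int :=
  aOuter players m k 0 (List.replicate players.length 0) 0 players.length

-- ===== PORT B =====
-- Source B's single pass: running active count + difference array of expiries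
def bLoop (players : List Int) (m k : Int) (i : Nat) (diff : List Int) (active answer : Int) : Nat → Int
  | 0 => answer
  | c+1 =>
    let active := active + diff.getD i 0
    if players.getD i 0 ≥ m then
      let need := PySem.Int.floordiv (players.getD i 0) m
      if active < need then
        let req := need - active
        if 0 < k then
          let diff' := if i + k.toNat < players.length then
              diff.set (i + k.toNat) (diff.getD (i + k.toNat) 0 - req) else diff
          bLoop players m k (i+1) diff' (active + req) (answer + req) c
        else bLoop players m k (i+1) diff active (answer + req) c
      else bLoop players m k (i+1) diff active answer c
    else bLoop players m k (i+1) diff active answer c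

def solution_alt (players : List Int) (m : Int) (k : Int) : Int :=
  bLoop players m k 0 (List.replicate players.length 0) 0 0 players.length

-- ===== PRECONDITION & SPEC =====
-- Pre_ excludes exactly the inputs where A raises ZeroDivisionError (m = 0 with some
-- players[i] ≥ 0 reaching 'players[i] // m'); B raises there too.
def Pre_solution (players : List Int) (m : Int) (k : Int) : Prop :=
  m ≠ 0 ∨ ∀ p ∈ players, p < 0
instance (players : List Int) (m : Int) (k : Int) : Decidable (Pre_solution players m k) := by
  unfold Pre_solution; infer_instance

def pvWitness_solution : List Int × Int × Int := ([1, 2], 1, 1)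

def Spec_solution (players : List Int) (m : Int) (k : Int) (out : Int) : Prop := out = solution_alt players m k
instance (players : List Int) (m : Int) (k : Int) (out : Int) : Decidable (Spec_solution players m k out) := by unfold Spec_solution; infer_instance

-- ===== CLAIM (what is proved, stated in full; the proofs are below) =====
def Claim_equal_solution : Prop := ∀ (players : List Int) (m : Int) (k : Int), Dom_solution players m k → Pre_solution players m k → Spec_solution players m k (solution players m k)

-- ===== LEMMAS AND PROOFS =====

-- sum of diff.getD over indices [i, i+c)
def sumD (d : List Int) (i : Nat) : Nat → Int
  | 0 => 0
  | c+1 => d.getD i 0 + sumD d (i+1) c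

lemma getD_replicate_zero (n t : Nat) : (List.replicate n (0:Int)).getD t 0 = 0 := by
  induction n generalizing t with
  | zero => simp [List.getD]
  | succ n ih =>
    cases t with
    | zero => simp [List.replicate]
    | succ t => simp only [List.replicate, List.getD]; exact ih t

lemma sumD_replicate (n i c : Nat) : sumD (List.replicate n (0:Int)) i c = 0 := by
  induction c generalizing i with
  | zero => rfl
  | succ c ih => simp [sumD, ih]

lemma getD_set (d : List Int) (p : Nat) (x : Int) (t : Nat) :
    (d.set p x).getD t 0 = if p = t ∧ p < d.length then x else d.getD t 0 := by
  induction d generalizing p t with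
  | nil => simp [List.getD]
  | cons a l ih =>
    cases p with
    | zero => cases t <;> simp [List.getD]
    | succ p =>
      cases t with
      | zero => simp [List.getD]
      | succ t => simpa [List.getD] using ih p t

lemma sumD_set (d : List Int) (p : Nat) (x : Int) (i c : Nat) :
    sumD (d.set p x) i c =
      sumD d i c + (if i ≤ p ∧ p < i + c ∧ p < d.length then x - d.getD p 0 else 0) := by
  induction c generalizing i with
  | zero => simp [sumD]; omega
  | succ c ih =>
    simp only [sumD, ih (i+1), getD_set]
    split_ifs with h1 h2 h3 h2 h3 <;>
      first | (exfalso; omega) | (obtain ⟨rfl, _⟩ := h1; ring) | ring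

lemma aInner_length (server : List Int) (pos : Nat) (r : Int) (c : Nat) :
    (aInner server pos r c).length = server.length := by
  induction c generalizing server pos with
  | zero => rfl
  | succ c ih =>
    unfold aInner
    split
    · rw [ih]; simp
    · rfl

lemma aInner_getD (server : List Int) (pos : Nat) (r : Int) (c : Nat) (t : Nat) :
    (aInner server pos r c).getD t 0 =
      server.getD t 0 + (if pos ≤ t ∧ t < pos + c ∧ t < server.length then r else 0) := by
  induction c generalizing server pos with
  | zero => simp [aInner]; omega
  | succ c ih =>
    unfold aInner
    split
    · rename_i h
      rw [ih, getD_set]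
      simp only [List.length_set]
      by_cases hpt : pos = t
      · subst hpt
        rw [if_pos ⟨rfl, h⟩, if_neg (by omega), if_pos ⟨Nat.le_refl _, by omega, h⟩]
        ring
      · rw [if_neg (by tauto)]
        have hiff : (pos + 1 ≤ t ∧ t < pos + 1 + c ∧ t < server.length) ↔
            (pos ≤ t ∧ t < pos + (c + 1) ∧ t < server.length) := by omega
        rw [if_congr hiff rfl rfl]
    · rename_i h
      split_ifs with h2
      · omega
      · ring

-- main invariant lemma: A's server array at positions ≥ i equals B's active count
-- plus the pending expiries recorded in diff
lemma loop_eq (players : List Int) (m k : Int) :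
    ∀ (c i : Nat) (server diff : List Int) (active answer : Int),
    i + c = players.length →
    server.length = players.length →
    diff.length = players.length →
    (∀ t, i ≤ t → t < players.length →
        server.getD t 0 = active + sumD diff i (t + 1 - i)) →
    aOuter players m k i server answer c = bLoop players m k i diff active answer c := by
  intro c
  induction c with
  | zero => intro i server diff active answer _ _ _ _; rfl
  | succ c ih =>
    intro i server diff active answer hc hs hd hinv
    have hiN : i < players.length := by omega
    have hsi : server.getD i 0 = active + diff.getD i 0 := by
      have := hinv i (Nat.le_refl i) hiN
      simpa [sumD] using this
    unfold aOuter bLoop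
    simp only
    split
    · -- players[i] ≥ m
      rw [hsi]
      split
      · -- shortage: req added
        rename_i hlt
        set need := PySem.Int.floordiv (players.getD i 0) m with hneed
        set req := need - (active + diff.getD i 0) with hreq
        by_cases hk : 0 < k
        · simp only [if_pos hk]
          -- A side: aInner adds req to slots [i, i+k.toNat) ∩ [0,N)
          set diff' := if i + k.toNat < players.length then
              diff.set (i + k.toNat) (diff.getD (i + k.toNat) 0 - req) else diff with hdiff'
          apply ih (i+1) _ diff' _ _
          · omega
          · rw [aInner_length]; exact hs
          · rw [hdiff']; split <;> simp [hd]
          · intro t ht htN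
            rw [aInner_getD, hs]
            have hkt : (1:Nat) ≤ k.toNat := by omega
            have hold := hinv t (by omega) htN
            have hsplit : sumD diff i (t + 1 - i) = diff.getD i 0 + sumD diff (i+1) (t - i) := by
              have : t + 1 - i = (t - i) + 1 := by omega
              rw [this]; rfl
            have hsum' : sumD diff' (i+1) (t + 1 - (i+1)) =
                sumD diff (i+1) (t - i) +
                  (if i + k.toNat ≤ t ∧ i + k.toNat < players.length then -req else 0) := by
              have htt : t + 1 - (i+1) = t - i := by omega
              rw [htt, hdiff']
              split
              · rename_i hin
                rw [sumD_set, hd]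
                congr 1
                split_ifs <;> first | (exfalso; omega) | ring
              · rename_i hout
                split_ifs with h
                · omega
                · ring
            rw [hsum', hold, hsplit]
            split_ifs <;> ring_nf <;> omega
        · -- k ≤ 0 : A's inner loop runs zero times, B records nothing active
          have : k.toNat = 0 := by omega
          rw [this]
          simp only [if_neg hk]
          apply ih (i+1) server diff _ _
          · omega
          · exact hs
          · exact hd
          · intro t ht htN
            have hold := hinv t (by omega) htN
            have : t + 1 - i = (t + 1 - (i+1)) + 1 := by omega
            rw [hold, this]
            simp [sumD]
            omega
      · -- enough servers
        apply ih (i+1) server diff _ _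
        · omega
        · exact hs
        · exact hd
        · intro t ht htN
          have hold := hinv t (by omega) htN
          have : t + 1 - i = (t + 1 - (i+1)) + 1 := by omega
          rw [hold, this]
          simp [sumD]
          omega
    · -- players[i] < m
      apply ih (i+1) server diff _ _
      · omega
      · exact hs
      · exact hd
      · intro t ht htN
        have hold := hinv t (by omega) htN
        have : t + 1 - i = (t + 1 - (i+1)) + 1 := by omega
        rw [hold, this]
        simp [sumD]
        omega

-- ===== VERDICT (by name: the statement is the Claim_ definition above) =====
theorem solution_spec : Claim_equal_solution := by
  intro players m k _ _
  unfold Spec_solution solution solution_alt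
  apply loop_eq players m k players.length 0 _ _ 0 0
  · omega
  · simp
  · simp
  · intro t _ htN
    rw [getD_replicate_zero, sumD_replicate]
    ring
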